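-- pv_equiv track=rewrite | github.com/weflossdaily/Project-Euler | 151.py | harvestAttempt
-- ===== SOURCE A (Python) =====
-- def harvestAttempt(sheetsInHand):
--     if sheetsInHand.count(5) > 0:
--         # Have an A5 and took it
--         sheetsInHand.remove(5)
--         return sheetsInHand
--     else:
--         # pull the smallest sheet and cut it up
--         smallestSheet = max(sheet for sheet in sheetsInHand)
--         sheetsInHand.remove(smallestSheet)
--         oneHalf = smallestSheet + 1
--         return harvestAttempt(sheetsInHand + [oneHalf,oneHalf])
-- ===== SOURCE B (Python) =====
-- def harvestAttempt(sheetsInHand):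
--     # Same observable mutation as A: removes the first 5, or the max, from the argument.
--     if 5 in sheetsInHand:
--         sheetsInHand.remove(5)
--         return sheetsInHand
--     m = max(sheetsInHand)
--     sheetsInHand.remove(m)
--     return sheetsInHand + list(range(m + 1, 6))
-- ===== Notes on version B (the rewrite author's own statement) =====
-- stated objective: simpler
-- what changed: Replaces A's recursive cut-and-recurse chain with one closed-form append of range(max+1, 6) after removing the max; Pre_ also bounds elements below by -500 because A's recursion depth is 6-max and far smaller maxima hit Python's recursion limit (the exact overflow point is interpreter-dependent, so the safe bound excludes some inputs where A still returns the same value B returns).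
-- outside the precondition, e.g. on harvestAttempt([]): A raises ValueError, B raises ValueError; on harvestAttempt([6]): A does not finish within the time limit, B returns []
import Mathlib
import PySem

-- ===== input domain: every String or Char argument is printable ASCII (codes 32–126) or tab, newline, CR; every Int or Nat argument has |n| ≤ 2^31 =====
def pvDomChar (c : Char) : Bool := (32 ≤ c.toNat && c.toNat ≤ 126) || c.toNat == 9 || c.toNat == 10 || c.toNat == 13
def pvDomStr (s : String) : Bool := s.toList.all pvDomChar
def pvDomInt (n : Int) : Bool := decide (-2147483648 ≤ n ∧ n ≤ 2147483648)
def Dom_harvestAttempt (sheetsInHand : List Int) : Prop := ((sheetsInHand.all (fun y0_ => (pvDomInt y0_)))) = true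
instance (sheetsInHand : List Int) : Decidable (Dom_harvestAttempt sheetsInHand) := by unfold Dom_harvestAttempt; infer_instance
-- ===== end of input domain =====

-- B replaces A's recursive cut-and-recurse chain with a closed-form append of range(max+1, 6)
-- (objective: simpler). Both Pythons mutate the argument identically (one .remove call);
-- the equivalence proved here is about the RETURN value only.

-- ===== PORT A =====
-- A's recursion is not structural; the fuel is an upper bound on A's recursion depth
-- (6 - max + 1) on the inputs Pre_ admits — a totality guard only, not a different algorithm.
def harvestGoA : Nat → List Int → List Int
  | 0, _ => []
  | f + 1, xs =>
    if PySem.List.count xs 5 > 0 then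
      (PySem.List.remove? xs 5).getD []            -- sheetsInHand.remove(5); return sheetsInHand
    else
      match PySem.List.max? xs (fun s => s) with
      | none => []                                 -- Python raises ValueError on empty; outside Pre_
      | some m =>
        match PySem.List.remove? xs m with
        | none => []                               -- unreachable: m ∈ xs
        | some rest => harvestGoA f (rest ++ [m + 1, m + 1])

def harvestAttempt (sheetsInHand : List Int) : List Int :=
  harvestGoA
    (match PySem.List.max? sheetsInHand (fun s => s) with
     | none => 1
     | some m => (6 - m).toNat + 1)
    sheetsInHand

-- ===== PORT B =====
def harvestAttempt_alt (sheetsInHand : List Int) : List Int :=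
  if sheetsInHand.contains 5 then
    (PySem.List.remove? sheetsInHand 5).getD []
  else
    match PySem.List.max? sheetsInHand (fun s => s) with
    | none => []                                   -- Python raises ValueError on empty; outside Pre_
    | some m =>
      match PySem.List.remove? sheetsInHand m with
      | none => []                                 -- unreachable: m ∈ xs
      | some rest => rest ++ PySem.List.pyRange (m + 1) 6 1

-- ===== PRECONDITION & SPEC =====
-- Pre_ excludes: the empty list (A raises ValueError), lists with an element > 5 and no 5
-- (A recurses forever / RecursionError), and — because A's recursion depth is 6 - max(xs) —
-- lists whose elements are all below -500, on which A overflows Python's interpreter-dependent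
-- recursion limit (near that fuzzy limit A may still return, and then returns B's value).
def Pre_harvestAttempt (sheetsInHand : List Int) : Prop :=
  sheetsInHand ≠ [] ∧
    ((5 : Int) ∈ sheetsInHand ∨
      ((∀ x ∈ sheetsInHand, x ≤ 5) ∧ ∃ x ∈ sheetsInHand, -500 ≤ x))
instance (sheetsInHand : List Int) : Decidable (Pre_harvestAttempt sheetsInHand) := by
  unfold Pre_harvestAttempt; infer_instance

def pvWitness_harvestAttempt : List Int := [2, 3, 4]

def Spec_harvestAttempt (sheetsInHand : List Int) (out : List Int) : Prop := out = harvestAttempt_alt sheetsInHand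
instance (sheetsInHand : List Int) (out : List Int) : Decidable (Spec_harvestAttempt sheetsInHand out) := by unfold Spec_harvestAttempt; infer_instance

-- ===== CLAIM (what is proved, stated in full; the proofs are below) =====
def Claim_equal_harvestAttempt : Prop := ∀ (sheetsInHand : List Int), Dom_harvestAttempt sheetsInHand → Pre_harvestAttempt sheetsInHand → Spec_harvestAttempt sheetsInHand (harvestAttempt sheetsInHand)

-- ===== LEMMAS AND PROOFS =====

-- remove? skips a prefix that does not contain the value
theorem remove?_append_of_not_mem (v : Int) (ys zs : List Int) (h : v ∉ ys) :
    PySem.List.remove? (ys ++ zs) v = (PySem.List.remove? zs v).map (ys ++ ·) := by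
  induction ys with
  | nil => simp [Option.map_id']
  | cons y t ih =>
    have hy : y ≠ v := fun hv => h (hv ▸ List.mem_cons_self)
    have ht : v ∉ t := fun hv => h (List.mem_cons_of_mem _ hv)
    rw [List.cons_append, PySem.List.remove?_cons_of_ne _ hy, ih ht]
    cases PySem.List.remove? zs v <;> simp

theorem foldl_max_le (b : Int) : ∀ (l : List Int) (a : Int), a ≤ b → (∀ x ∈ l, x ≤ b) →
    l.foldl max a ≤ b := by
  intro l
  induction l with
  | nil => intro a ha _; simpa using ha
  | cons x t ih =>
    intro a ha hl
    simp only [List.foldl_cons]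
    exact ih _ (max_le ha (hl x List.mem_cons_self)) (fun y hy => hl y (List.mem_cons_of_mem _ hy))

-- the first-maximum of ys ++ [v, v] is the first appended v when everything in ys is below v
theorem max?_append_pair (ys : List Int) (v : Int) (h : ∀ x ∈ ys, x < v) :
    PySem.List.max? (ys ++ [v, v]) (fun s => s) = some v := by
  cases ys with
  | nil => simp [PySem.List.max?_id_cons]
  | cons y t =>
    rw [List.cons_append, PySem.List.max?_id_cons]
    have hle : t.foldl max y ≤ v :=
      foldl_max_le v t y (le_of_lt (h y List.mem_cons_self))
        (fun x hx => le_of_lt (h x (List.mem_cons_of_mem _ hx)))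
    rw [List.foldl_append]
    simp [max_eq_right hle]

-- main closed-form lemma for A's recursion
theorem harvestGoA_closed : ∀ (f : Nat) (xs : List Int) (m : Int),
    PySem.List.max? xs (fun s => s) = some m → (5 : Int) ∉ xs → m < 5 →
    (5 - m).toNat < f →
    harvestGoA f xs = xs.erase m ++ PySem.List.pyRange (m + 1) 6 1 := by
  intro f
  induction f with
  | zero => intro xs m _ _ _ hf; omega
  | succ f ih =>
    intro xs m hmax h5 hm hf
    have hmem : m ∈ xs := PySem.List.max?_mem hmax
    have hcount : PySem.List.count xs 5 = 0 := by
      rw [PySem.List.count_eq]; exact List.count_eq_zero.mpr h5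
    have hrem : PySem.List.remove? xs m = some (xs.erase m) :=
      PySem.List.remove?_eq_some_erase xs m hmem
    have hlt : ∀ x ∈ xs.erase m, x < m + 1 := by
      intro x hx
      have := PySem.List.max?_isMax hmax x (List.mem_of_mem_erase hx)
      omega
    simp only [harvestGoA, hcount, hmax, hrem]
    norm_num
    by_cases hcase : m + 1 = 5
    · -- next call takes the count-5 branch
      obtain ⟨f', rfl⟩ : ∃ f', f = f' + 1 := by
        cases f with
        | zero => omega
        | succ k => exact ⟨k, rfl⟩
      have h5mem : (5 : Int) ∈ xs.erase m ++ [m + 1, m + 1] := by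
        rw [hcase]; simp
      have hc : PySem.List.count (xs.erase m ++ [m + 1, m + 1]) 5 > 0 := by
        rw [PySem.List.count_eq]; exact List.count_pos_iff.mpr h5mem
      have hr : PySem.List.remove? (xs.erase m ++ [m + 1, m + 1]) 5
          = some (xs.erase m ++ [m + 1]) := by
        rw [remove?_append_of_not_mem 5 _ _ (fun hx => absurd (hlt 5 hx) (by omega))]
        rw [hcase]
        simp
      simp only [harvestGoA, hc, if_pos, hr]
      have : PySem.List.pyRange (m + 1) 6 1 = [m + 1] := by
        have h6 : (6 : Int) = (m + 1) + 1 := by omega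
        rw [h6, PySem.List.pyRange_one_singleton]
      simp [this]
    · -- recurse via ih on xs.erase m ++ [m+1, m+1]
      have hmax' : PySem.List.max? (xs.erase m ++ [m + 1, m + 1]) (fun s => s) = some (m + 1) :=
        max?_append_pair _ _ hlt
      have h5' : (5 : Int) ∉ xs.erase m ++ [m + 1, m + 1] := by
        intro hx
        rcases List.mem_append.mp hx with hx | hx
        · exact absurd (hlt 5 hx) (by omega)
        · simp at hx; omega
      have herase : (xs.erase m ++ [m + 1, m + 1]).erase (m + 1) = xs.erase m ++ [m + 1] := by
        rw [List.erase_append_right _ (fun hx => absurd (hlt _ hx) (by omega))]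
        simp
      rw [ih _ _ hmax' h5' (by omega) (by omega), herase]
      have : PySem.List.pyRange (m + 1) 6 1 = (m + 1) :: PySem.List.pyRange (m + 1 + 1) 6 1 := by
        have := PySem.List.pyRange_one_cons (a := m + 1) (b := 6) (by omega)
        simpa using this
      rw [this]
      simp

theorem harvestAttempt_spec : Claim_equal_harvestAttempt := by
  unfold Claim_equal_harvestAttempt
  intro xs _ hpre
  unfold Spec_harvestAttempt harvestAttempt harvestAttempt_alt
  obtain ⟨hne, hcase⟩ := hpre
  by_cases h5 : (5 : Int) ∈ xs
  · have hc : PySem.List.count xs 5 > 0 := by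
      rw [PySem.List.count_eq]; exact List.count_pos_iff.mpr h5
    have hcontains : xs.contains 5 = true := by simpa using h5
    cases hmx : PySem.List.max? xs (fun s => s) with
    | none => simp [harvestGoA, h5]
    | some m => simp [harvestGoA, h5]
  · rcases hcase with h | ⟨hle, _⟩
    · exact absurd h h5
    cases hmx : PySem.List.max? xs (fun s => s) with
    | none =>
      cases xs with
      | nil => exact absurd rfl hne
      | cons y t => rw [PySem.List.max?_id_cons] at hmx; exact absurd hmx (by simp)
    | some m =>
      have hm5 : m < 5 := by
        have hmem := PySem.List.max?_mem hmx
        have := hle m hmem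
        rcases lt_or_eq_of_le this with h | h
        · exact h
        · exact absurd (h ▸ hmem) h5
      have hcontains : xs.contains 5 = false := by simpa using h5
      have hrem : PySem.List.remove? xs m = some (xs.erase m) :=
        PySem.List.remove?_eq_some_erase xs m (PySem.List.max?_mem hmx)
      have hA : harvestGoA ((6 - m).toNat + 1) xs = xs.erase m ++ PySem.List.pyRange (m + 1) 6 1 :=
        harvestGoA_closed _ _ _ hmx h5 hm5 (by omega)
      simpa [hcontains, hrem, h5] using hA
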